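-- pv_equiv track=rewrite | github.com/ChristopherSWest/FateTeamTools | FateTools/certtools/views.py | add_colon
-- ===== SOURCE A (Python) =====
-- def add_colon(hex):
--     hex_list = list(hex)
--
--     count = 0
--     updated_hex = ""
--     for digit in hex:
--         count += 1
--         updated_hex += digit
--         if (count % 2 == 0 and count < len(hex)):
--             updated_hex += ':'
--     return updated_hex
-- ===== SOURCE B (Python) =====
-- def add_colon(hex):
--     chunks = [hex[i:i+2] for i in range(0, len(hex), 2)]
--     return ':'.join(chunks)
-- ===== Notes on version B (the rewrite author's own statement) =====
-- stated objective: idiomatic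
-- what changed: Replaced the char-by-char loop with a counter and conditional separator appends by a chunk-then-join decomposition: build the list of 2-character slices, then join them with colon separators.
import Mathlib
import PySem

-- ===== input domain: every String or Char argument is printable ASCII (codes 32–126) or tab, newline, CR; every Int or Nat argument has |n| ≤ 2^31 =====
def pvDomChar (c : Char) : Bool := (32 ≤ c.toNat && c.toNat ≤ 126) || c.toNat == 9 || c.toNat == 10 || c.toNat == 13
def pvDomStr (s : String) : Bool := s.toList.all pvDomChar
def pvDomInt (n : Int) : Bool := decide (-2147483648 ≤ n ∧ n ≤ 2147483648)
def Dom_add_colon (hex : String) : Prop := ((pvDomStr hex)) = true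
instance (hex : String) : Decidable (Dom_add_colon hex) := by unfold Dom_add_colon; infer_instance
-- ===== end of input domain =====

-- B inserts ':' between 2-character chunks by slicing then joining, instead of A's
-- char-by-char loop with a counter and conditional separator appends (idiomatic decomposition).

-- ===== PORT A =====
-- loop body of A: count += 1; updated_hex += digit; conditionally append ':'
def aStep (n : Nat) (st : Nat × List Char) (digit : Char) : Nat × List Char :=
  let count := st.1 + 1
  let acc := st.2 ++ [digit]
  if count % 2 = 0 ∧ count < n then (count, acc ++ [':']) else (count, acc)

def add_colon (hex : String) : String :=
  String.ofList (hex.toList.foldl (aStep hex.toList.length) (0, ([] : List Char))).2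

-- ===== PORT B =====
-- chunks = [hex[i:i+2] for i in range(0, len(hex), 2)]; return ':'.join(chunks)
def add_colon_alt (hex : String) : String :=
  String.ofList (PySem.Chars.join [':']
    ((PySem.List.pyRange 0 (PySem.List.len hex.toList) 2).map
      (fun i => PySem.List.slice hex.toList (some i) (some (i + 2)))))

-- ===== PRECONDITION & SPEC =====
def Spec_add_colon (hex : String) (out : String) : Prop := out = add_colon_alt hex
instance (hex : String) (out : String) : Decidable (Spec_add_colon hex out) := by unfold Spec_add_colon; infer_instance

-- ===== CLAIM (what is proved, stated in full; the proofs are below) =====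
def Claim_equal_add_colon : Prop := ∀ (hex : String), Dom_add_colon hex → Spec_add_colon hex (add_colon hex)

-- ===== LEMMAS AND PROOFS =====

-- the list of 2-character chunks of a list
def chunksC : List Char → List (List Char)
  | [] => []
  | [a] => [[a]]
  | a :: b :: t => [a, b] :: chunksC t

lemma aStep_apply (n c : Nat) (acc : List Char) (d : Char) :
    aStep n (c, acc) d =
      if (c + 1) % 2 = 0 ∧ c + 1 < n then (c + 1, acc ++ [d] ++ [':']) else (c + 1, acc ++ [d]) := rfl

lemma join_colon_cons (p : List Char) (cts : List (List Char)) (h : cts ≠ []) :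
    PySem.Chars.join [':'] (p :: cts) = p ++ ':' :: PySem.Chars.join [':'] cts := by
  cases cts with
  | nil => exact absurd rfl h
  | cons q rest => rw [PySem.Chars.join_cons_cons]; simp

lemma chunksC_ne_nil (l : List Char) (h : l ≠ []) : chunksC l ≠ [] := by
  cases l with
  | nil => exact absurd rfl h
  | cons a t => cases t <;> simp [chunksC]

lemma foldA (l : List Char) : ∀ (c : Nat) (acc : List Char), c % 2 = 0 →
    (l.foldl (aStep (c + l.length)) (c, acc)).2
      = acc ++ PySem.Chars.join [':'] (chunksC l) := by
  induction l using chunksC.induct with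
  | case1 => intro c acc _; simp [chunksC, PySem.Chars.join_nil]
  | case2 a =>
      intro c acc hc
      have h1 : ¬ ((c + 1) % 2 = 0 ∧ c + 1 < c + [a].length) := by
        rintro ⟨h, _⟩; omega
      rw [List.foldl_cons, aStep_apply, if_neg h1, List.foldl_nil]
      simp [chunksC, PySem.Chars.join_singleton]
  | case3 a b t ih =>
      intro c acc hc
      have h1 : ¬ ((c + 1) % 2 = 0 ∧ c + 1 < c + (a :: b :: t).length) := by
        rintro ⟨h, _⟩; omega
      rw [List.foldl_cons, aStep_apply, if_neg h1, List.foldl_cons, aStep_apply]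
      by_cases ht : t = []
      · subst ht
        have h2 : ¬ ((c + 1 + 1) % 2 = 0 ∧ c + 1 + 1 < c + ([a, b] : List Char).length) := by
          rintro ⟨_, h⟩; simp at h
        rw [if_neg h2, List.foldl_nil]
        simp [chunksC, PySem.Chars.join_singleton]
      · have h2 : ((c + 1 + 1) % 2 = 0 ∧ c + 1 + 1 < c + (a :: b :: t).length) := by
          have : t.length > 0 := List.length_pos_iff.mpr ht
          constructor
          · omega
          · simp; omega
        rw [if_pos h2]
        have heq : c + (a :: b :: t).length = (c + 1 + 1) + t.length := by simp; omega
        rw [heq, ih (c + 1 + 1) _ (by omega)]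
        rw [chunksC, join_colon_cons _ _ (chunksC_ne_nil t ht)]
        simp

lemma rangeChunks (l : List Char) :
    (List.range ((l.length + 1) / 2)).map (fun k => (l.drop (2 * k)).take 2) = chunksC l := by
  induction l using chunksC.induct with
  | case1 => simp [chunksC]
  | case2 a => simp [chunksC]
  | case3 a b t ih =>
      have hlen : ((a :: b :: t).length + 1) / 2 = (t.length + 1) / 2 + 1 := by simp; omega
      rw [hlen, List.range_succ_eq_map, List.map_cons, List.map_map]
      rw [chunksC]
      congr 1

lemma mapSlices (cs : List Char) :
    (PySem.List.pyRange 0 (PySem.List.len cs) 2).map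
      (fun i => PySem.List.slice cs (some i) (some (i + 2))) = chunksC cs := by
  rw [PySem.List.pyRange_of_pos _ _ (by norm_num : (0:Int) < 2)]
  have hq : (if (0:Int) < PySem.List.len cs then ((PySem.List.len cs - 0 + 2 - 1) / 2).toNat else 0)
      = (cs.length + 1) / 2 := by
    simp only [PySem.List.len_eq]
    split_ifs with h <;> omega
  rw [hq, List.map_map, ← rangeChunks cs]
  apply List.map_congr_left
  intro k _
  simp only [Function.comp_apply]
  have h1 : (0:Int) + 2 * (k:Int) = ((2 * k : Nat) : Int) := by push_cast; ring
  rw [h1]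
  have h2 : ((2 * k : Nat) : Int) + 2 = ((2 * k : Nat) : Int) + ((2:Nat) : Int) := by norm_num
  rw [h2, PySem.List.slice_natCast_add]

-- ===== VERDICT (by name: the statement is the Claim_ definition above) =====
theorem add_colon_spec : Claim_equal_add_colon := by
  intro hex _
  unfold Spec_add_colon add_colon add_colon_alt
  rw [mapSlices]
  have h := foldA hex.toList 0 [] (by omega)
  simp only [Nat.zero_add] at h
  rw [h, List.nil_append]
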